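-- pv_equiv track=rewrite | github.com/thinkSharp/interviewsBit | seating_arrangements.py | minOverallAwkwardness
-- ===== SOURCE A (Python) =====
-- from collections import deque
--
-- def minOverallAwkwardness(arr):
--     n = len(arr)
--     if n <= 1:
--         return 0
--
--     queue = deque()
--     sorted_arr = sorted(arr)
--     queue.append(sorted_arr[-1])
--     for i in range(n-2, -1,-1):
--         if i % 2 == 0:
--             queue.append(sorted_arr[i])
--         else:
--             queue.appendleft(sorted_arr[i])
--
--     max_awkwardness = 0
--     for j in range(1, n):
--         max_awkwardness = max(max_awkwardness, abs(queue[j] - queue[j-1]))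
--
--     max_awkwardness = max(max_awkwardness, abs(queue[-1] - queue[0]))
--
--     return max_awkwardness
-- ===== SOURCE B (Python) =====
-- def minOverallAwkwardness(arr):
--     n = len(arr)
--     if n <= 1:
--         return 0
--     s = sorted(arr)
--     if n == 2:
--         return s[1] - s[0]
--     m = 0
--     for i in range(n - 2):
--         m = max(m, s[i + 2] - s[i])
--     return m
-- ===== Notes on version B (the rewrite author's own statement) =====
-- stated objective: simpler
-- what changed: B never builds the deque zigzag arrangement: it sorts and returns the maximum of s[i+2]-s[i] in one direct pass over the sorted array (with guards for n<=2), instead of constructing the circular seating and scanning its adjacent pairs by deque index.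
import Mathlib
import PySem

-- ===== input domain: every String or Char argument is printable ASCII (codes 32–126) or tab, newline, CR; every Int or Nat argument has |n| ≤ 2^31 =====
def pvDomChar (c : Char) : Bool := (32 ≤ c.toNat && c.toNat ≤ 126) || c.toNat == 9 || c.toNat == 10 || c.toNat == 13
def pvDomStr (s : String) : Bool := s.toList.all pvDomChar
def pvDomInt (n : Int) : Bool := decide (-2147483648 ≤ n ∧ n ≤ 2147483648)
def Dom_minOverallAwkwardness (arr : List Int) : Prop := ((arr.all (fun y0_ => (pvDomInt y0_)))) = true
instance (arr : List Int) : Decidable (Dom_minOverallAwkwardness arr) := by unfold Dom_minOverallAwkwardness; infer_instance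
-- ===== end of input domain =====

-- B drops A's deque zigzag arrangement and computes the answer as a single pass
-- of max(s[i+2]-s[i]) over the sorted array (objective: simpler).


-- ===== PORT A =====
def minOverallAwkwardness (arr : List Int) : Int :=
  let n : Int := arr.length
  if n ≤ 1 then 0
  else
    let sorted_arr := PySem.List.sorted arr (fun x => x) false
    let queue : List Int := [PySem.List.pyGetD sorted_arr (-1) 0]
    let queue := (PySem.List.pyRange (n - 2) (-1) (-1)).foldl (fun q i =>
      if PySem.Int.mod i 2 = 0 then q ++ [PySem.List.pyGetD sorted_arr i 0]
      else PySem.List.pyGetD sorted_arr i 0 :: q) queue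
    let m : Int := (PySem.List.pyRange 1 n 1).foldl (fun m j =>
      max m |PySem.List.pyGetD queue j 0 - PySem.List.pyGetD queue (j - 1) 0|) 0
    max m |PySem.List.pyGetD queue (-1) 0 - PySem.List.pyGetD queue 0 0|

-- ===== PORT B =====
def minOverallAwkwardness_alt (arr : List Int) : Int :=
  let n : Int := arr.length
  if n ≤ 1 then 0
  else
    let s := PySem.List.sorted arr (fun x => x) false
    if n = 2 then PySem.List.pyGetD s 1 0 - PySem.List.pyGetD s 0 0
    else (PySem.List.pyRange 0 (n - 2) 1).foldl (fun m i =>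
      max m (PySem.List.pyGetD s (i + 2) 0 - PySem.List.pyGetD s i 0)) 0

-- ===== PRECONDITION & SPEC =====
def Spec_minOverallAwkwardness (arr : List Int) (out : Int) : Prop := out = minOverallAwkwardness_alt arr
instance (arr : List Int) (out : Int) : Decidable (Spec_minOverallAwkwardness arr out) := by unfold Spec_minOverallAwkwardness; infer_instance

-- ===== CLAIM (what is proved, stated in full; the proofs are below) =====
def Claim_equal_minOverallAwkwardness : Prop := ∀ (arr : List Int), Dom_minOverallAwkwardness arr → Spec_minOverallAwkwardness arr (minOverallAwkwardness arr)

-- ===== LEMMAS AND PROOFS =====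

-- The two halves of A's deque: zigL g m = g i for odd i < m, ascending;
-- zigR g m = g i for even i < m, descending.
def zigL (g : ℕ → Int) : ℕ → List Int
  | 0 => []
  | (m + 1) => if m % 2 = 1 then zigL g m ++ [g m] else zigL g m

def zigR (g : ℕ → Int) : ℕ → List Int
  | 0 => []
  | (m + 1) => if m % 2 = 1 then zigR g m else g m :: zigR g m

-- index into the sorted array occupied by position k of A's deque (length N)
def qIdx (N k : ℕ) : ℕ :=
  if k < (N - 1) / 2 then 2 * k + 1
  else if k = (N - 1) / 2 then N - 1
  else 2 * (N - 1 - k)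

-- A's first loop builds  zigL ++ q0 ++ zigR  around the initial queue q0.
lemma queue_fold (s : List Int) (m : ℕ) : ∀ (q0 : List Int),
    (PySem.List.pyRange ((m : Int) - 1) (-1) (-1)).foldl (fun q i =>
      if PySem.Int.mod i 2 = 0 then q ++ [PySem.List.pyGetD s i 0]
      else PySem.List.pyGetD s i 0 :: q) q0
    = zigL (fun k => s.getD k 0) m ++ q0 ++ zigR (fun k => s.getD k 0) m := by
  induction m with
  | zero =>
      intro q0
      rw [PySem.List.pyRange_neg_one_eq_nil (by omega)]
      simp [zigL, zigR]
  | succ m ih =>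
      intro q0
      rw [show ((↑(m + 1) : Int) - 1) = (m : Int) by push_cast; ring,
          PySem.List.pyRange_neg_one_cons (by omega)]
      simp only [List.foldl_cons]
      have hmod : PySem.Int.mod (m : Int) 2 = ((m % 2 : ℕ) : Int) := by
        exact_mod_cast PySem.Int.mod_natCast m 2
      have hget : PySem.List.pyGetD s (m : Int) 0 = s.getD m 0 := by
        simp [PySem.List.pyGetD_natCast]
      rw [show ((m : Int) - 1) = ((m : Int) - 1) from rfl]
      rcases Nat.even_or_odd m with he | ho
      · have h2 : m % 2 = 0 := Nat.even_iff.mp he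
        rw [if_pos (by rw [hmod, h2]; rfl), ih]
        simp [zigL, zigR, h2, hget]
      · have h2 : m % 2 = 1 := Nat.odd_iff.mp ho
        rw [if_neg (by rw [hmod, h2]; simp), ih]
        simp [zigL, zigR, h2, hget]

-- Closed forms for the two halves.
lemma zigL_eq (g : ℕ → Int) (m : ℕ) :
    zigL g m = (List.range (m / 2)).map (fun k => g (2 * k + 1)) := by
  induction m with
  | zero => simp [zigL]
  | succ m ih =>
      rcases Nat.even_or_odd m with he | ho
      · have h2 : m % 2 = 0 := Nat.even_iff.mp he
        have hq : (m + 1) / 2 = m / 2 := by omega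
        simp [zigL, h2, hq, ih]
      · have h2 : m % 2 = 1 := Nat.odd_iff.mp ho
        have hq : (m + 1) / 2 = m / 2 + 1 := by omega
        rw [zigL, if_pos h2, ih, hq, List.range_succ]
        simp only [List.map_append, List.map_cons, List.map_nil]
        have hm : 2 * (m / 2) + 1 = m := by omega
        rw [hm]

lemma zigR_eq (g : ℕ → Int) (m : ℕ) :
    zigR g m = (List.range (m - m / 2)).map (fun t => g (2 * ((m - 1) / 2) - 2 * t)) := by
  induction m with
  | zero => simp [zigR]
  | succ m ih =>
      rcases Nat.even_or_odd m with he | ho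
      · have h2 : m % 2 = 0 := Nat.even_iff.mp he
        have hc : (m + 1) - (m + 1) / 2 = (m - m / 2) + 1 := by omega
        rw [zigR, if_neg (by omega), ih, hc, List.range_succ_eq_map]
        simp only [List.map_cons, List.map_map]
        refine congrArg₂ _ (by congr 1; omega) ?_
        apply List.map_congr_left
        intro t ht
        simp only [List.mem_range] at ht
        simp only [Function.comp_apply, Nat.succ_eq_add_one]
        congr 1
        omega
      · have h2 : m % 2 = 1 := Nat.odd_iff.mp ho
        have hc : (m + 1) - (m + 1) / 2 = m - m / 2 := by omega
        rw [zigR, if_pos h2, ih, hc]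
        apply List.map_congr_left
        intro t ht
        simp only [List.mem_range] at ht
        congr 1
        omega

lemma length_zigL (g : ℕ → Int) (m : ℕ) : (zigL g m).length = m / 2 := by
  rw [zigL_eq]; simp

lemma length_zigR (g : ℕ → Int) (m : ℕ) : (zigR g m).length = m - m / 2 := by
  rw [zigR_eq]; simp

-- the deque realises qIdx
lemma queue_closed (g : ℕ → Int) (N : ℕ) (hN : 2 ≤ N) (k : ℕ) (hk : k < N) :
    (zigL g (N - 1) ++ [g (N - 1)] ++ zigR g (N - 1)).getD k 0 = g (qIdx N k) := by
  rw [zigL_eq, zigR_eq]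
  rw [List.getD_eq_getElem _ _ (by simp; omega)]
  by_cases h1 : k < (N - 1) / 2
  · rw [List.getElem_append_left (by simp; omega),
        List.getElem_append_left (by simp; omega)]
    simp only [List.getElem_map, List.getElem_range]
    simp [qIdx, h1]
  · by_cases h2 : k = (N - 1) / 2
    · rw [List.getElem_append_left (by simp; omega),
          List.getElem_append_right (by simp; omega), List.getElem_singleton]
      simp [qIdx, h2]
    · rw [List.getElem_append_right (by simp; omega)]
      simp only [List.getElem_map, List.getElem_range, List.length_append,
        List.length_map, List.length_range, List.length_cons, List.length_nil]
      rw [show 2 * ((N - 1 - 1) / 2) - 2 * (k - ((N - 1) / 2 + 0 + 1)) = 2 * (N - 1 - k) by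
            omega]
      simp [qIdx, h1, h2]

-- upper bound for a running max
lemma foldl_max_le {α : Type} (f : α → Int) (c : Int) :
    ∀ (l : List α) (init : Int), init ≤ c → (∀ x ∈ l, f x ≤ c) →
      l.foldl (fun m x => max m (f x)) init ≤ c := by
  intro l
  induction l with
  | nil => intro init h0 _; simpa using h0
  | cons y t ih =>
      intro init h0 h
      simp only [List.foldl_cons]
      exact ih _ (by
        have := h y (by simp)
        exact max_le h0 this) (fun x hx => h x (by simp [hx]))

-- the heart: on a sorted array of length N ≥ 3, the circular max over A's
-- zigzag deque equals the max of the gap-2 differences.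
lemma zig_max_eq (g : ℕ → Int) (N : ℕ) (hN : 3 ≤ N)
    (mono : ∀ i j, i ≤ j → j < N → g i ≤ g j) :
    max ((List.range (N - 1)).foldl
          (fun m k => max m |g (qIdx N (k + 1)) - g (qIdx N k)|) 0)
        |g (qIdx N (N - 1)) - g (qIdx N 0)|
    = (List.range (N - 2)).foldl (fun m i => max m (g (i + 2) - g i)) 0 := by
  obtain ⟨hB0, hBmem⟩ :=
    PySem.List.le_foldl_max_int (List.range (N - 2)) (fun i => g (i + 2) - g i) 0
  obtain ⟨hA0, hAmem⟩ :=
    PySem.List.le_foldl_max_int (List.range (N - 1))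
      (fun k => |g (qIdx N (k + 1)) - g (qIdx N k)|) 0
  set Bv := (List.range (N - 2)).foldl (fun m i => max m (g (i + 2) - g i)) 0 with hBv
  set Av := (List.range (N - 1)).foldl
      (fun m k => max m |g (qIdx N (k + 1)) - g (qIdx N k)|) 0 with hAv
  have gap2 : ∀ i, i + 2 < N → g (i + 2) - g i ≤ Bv := fun i hi =>
    hBmem i (List.mem_range.mpr (by omega))
  have q0 : qIdx N 0 = 1 := by rw [qIdx, if_pos (by omega)]
  have qlast : qIdx N (N - 1) = 0 := by
    rw [qIdx, if_neg (by omega), if_neg (by omega)]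
    omega
  -- every adjacent pair of the deque is dominated by a gap-2 difference
  have pair_bound : ∀ k, k < N - 1 →
      ∃ i, i + 2 < N ∧ |g (qIdx N (k + 1)) - g (qIdx N k)| ≤ g (i + 2) - g i := by
    intro k hk
    by_cases hc1 : k + 1 < (N - 1) / 2
    · refine ⟨2 * k + 1, by omega, ?_⟩
      rw [show qIdx N k = 2 * k + 1 by rw [qIdx, if_pos (by omega)],
          show qIdx N (k + 1) = 2 * k + 1 + 2 by rw [qIdx, if_pos hc1]; ring]
      have m1 := mono (2 * k + 1) (2 * k + 1 + 2) (by omega) (by omega)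
      refine abs_sub_le_iff.mpr ⟨by omega, by omega⟩
    · by_cases hc2 : k + 1 = (N - 1) / 2
      · refine ⟨N - 3, by omega, ?_⟩
        rw [show qIdx N k = 2 * k + 1 by rw [qIdx, if_pos (by omega)],
            show qIdx N (k + 1) = N - 1 by rw [qIdx, if_neg (by omega), if_pos hc2],
            show N - 3 + 2 = N - 1 by omega]
        have m1 := mono (N - 3) (2 * k + 1) (by omega) (by omega)
        have m2 := mono (2 * k + 1) (N - 1) (by omega) (by omega)
        refine abs_sub_le_iff.mpr ⟨by omega, by omega⟩
      · by_cases hc3 : k = (N - 1) / 2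
        · refine ⟨N - 3, by omega, ?_⟩
          rw [show qIdx N k = N - 1 by rw [qIdx, if_neg (by omega), if_pos hc3],
              show qIdx N (k + 1) = 2 * (N - 1 - (k + 1)) by
                rw [qIdx, if_neg (by omega), if_neg (by omega)],
              show N - 3 + 2 = N - 1 by omega]
          have m1 := mono (N - 3) (2 * (N - 1 - (k + 1))) (by omega) (by omega)
          have m2 := mono (2 * (N - 1 - (k + 1))) (N - 1) (by omega) (by omega)
          refine abs_sub_le_iff.mpr ⟨by omega, by omega⟩
        · refine ⟨2 * (N - 1 - (k + 1)), by omega, ?_⟩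
          rw [show qIdx N k = 2 * (N - 1 - k) by
                rw [qIdx, if_neg (by omega), if_neg (by omega)],
              show qIdx N (k + 1) = 2 * (N - 1 - (k + 1)) by
                rw [qIdx, if_neg (by omega), if_neg (by omega)],
              show 2 * (N - 1 - (k + 1)) + 2 = 2 * (N - 1 - k) by omega]
          have m1 := mono (2 * (N - 1 - (k + 1))) (2 * (N - 1 - k)) (by omega) (by omega)
          refine abs_sub_le_iff.mpr ⟨by omega, by omega⟩
  -- every gap-2 difference occurs as an adjacent pair of the deque
  have cover : ∀ i, i < N - 2 →
      ∃ k, k < N - 1 ∧ |g (qIdx N (k + 1)) - g (qIdx N k)| = g (i + 2) - g i := by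
    intro i hi
    have mi := mono i (i + 2) (by omega) (by omega)
    by_cases hp : i % 2 = 1
    · by_cases hc : i / 2 + 1 < (N - 1) / 2
      · refine ⟨i / 2, by omega, ?_⟩
        rw [show qIdx N (i / 2) = i by rw [qIdx, if_pos (by omega)]; omega,
            show qIdx N (i / 2 + 1) = i + 2 by rw [qIdx, if_pos hc]; omega]
        exact abs_of_nonneg (by omega)
      · refine ⟨(N - 1) / 2 - 1, by omega, ?_⟩
        rw [show (N - 1) / 2 - 1 + 1 = (N - 1) / 2 by omega,
            show qIdx N ((N - 1) / 2 - 1) = i by rw [qIdx, if_pos (by omega)]; omega,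
            show qIdx N ((N - 1) / 2) = i + 2 by
              rw [qIdx, if_neg (by omega), if_pos rfl]; omega]
        exact abs_of_nonneg (by omega)
    · by_cases hc : (N - 1) / 2 < N - 2 - i / 2
      · refine ⟨N - 2 - i / 2, by omega, ?_⟩
        rw [show qIdx N (N - 2 - i / 2) = i + 2 by
              rw [qIdx, if_neg (by omega), if_neg (by omega)]; omega,
            show qIdx N (N - 2 - i / 2 + 1) = i by
              rw [qIdx, if_neg (by omega), if_neg (by omega)]; omega]
        rw [abs_sub_comm]
        exact abs_of_nonneg (by omega)
      · refine ⟨(N - 1) / 2, by omega, ?_⟩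
        rw [show qIdx N ((N - 1) / 2) = i + 2 by
              rw [qIdx, if_neg (by omega), if_pos rfl]; omega,
            show qIdx N ((N - 1) / 2 + 1) = i by
              rw [qIdx, if_neg (by omega), if_neg (by omega)]; omega]
        rw [abs_sub_comm]
        exact abs_of_nonneg (by omega)
  apply le_antisymm
  · apply max_le
    · apply foldl_max_le _ _ _ _ hB0
      intro k hk
      obtain ⟨i, hi, hle⟩ := pair_bound k (List.mem_range.mp hk)
      exact le_trans hle (gap2 i hi)
    · rw [q0, qlast]
      have m1 := mono 0 1 (by omega) (by omega)
      have m2 := mono 1 2 (by omega) (by omega)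
      have h02 : g 2 - g 0 ≤ Bv := by simpa using gap2 0 (by omega)
      rw [abs_sub_comm, abs_of_nonneg (by omega)]
      omega
  · apply foldl_max_le _ _ _ _ (le_trans hA0 (le_max_left _ _))
    intro i hi
    obtain ⟨k, hk, heq⟩ := cover i (List.mem_range.mp hi)
    calc g (i + 2) - g i = |g (qIdx N (k + 1)) - g (qIdx N k)| := heq.symm
      _ ≤ Av := hAmem k (List.mem_range.mpr hk)
      _ ≤ _ := le_max_left _ _

-- evaluating port A in terms of qIdx (any input of length ≥ 2)
lemma A_eval (arr : List Int) (h2 : 2 ≤ arr.length) :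
    minOverallAwkwardness arr =
      max ((List.range (arr.length - 1)).foldl
            (fun m k => max m
              |(PySem.List.sorted arr (fun x => x) false).getD (qIdx arr.length (k + 1)) 0 -
                (PySem.List.sorted arr (fun x => x) false).getD (qIdx arr.length k) 0|) 0)
          |(PySem.List.sorted arr (fun x => x) false).getD (qIdx arr.length (arr.length - 1)) 0 -
            (PySem.List.sorted arr (fun x => x) false).getD (qIdx arr.length 0) 0| := by
  have hlen : (PySem.List.sorted arr (fun x => x) false).length = arr.length :=
    PySem.List.length_sorted arr _ false
  simp only [minOverallAwkwardness]
  rw [if_neg (by omega)]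
  set s := PySem.List.sorted arr (fun x => x) false with hsdef
  set N := arr.length with hNdef
  have hN2 : 2 ≤ N := h2
  -- initial queue element: sorted_arr[-1]
  have h0 : PySem.List.pyGetD s (-1) 0 = s.getD (N - 1) 0 := by
    rw [PySem.List.pyGetD_neg_ofNat s 1 0 (by omega) (by simp [hlen]; omega)]
    rw [List.getD_eq_getElem _ _ (by omega)]
    congr 1
    omega
  rw [h0]
  -- the building loop
  rw [show ((N : Int) - 2) = ((N - 1 : ℕ) : Int) - 1 by
        rw [Nat.cast_sub (by omega)]; push_cast; ring,
      queue_fold s (N - 1) [s.getD (N - 1) 0]]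
  set Qlist := zigL (fun k => s.getD k 0) (N - 1) ++ [s.getD (N - 1) 0] ++
      zigR (fun k => s.getD k 0) (N - 1) with hQdef
  have hQlen : Qlist.length = N := by
    rw [hQdef]
    simp [length_zigL, length_zigR]
    omega
  have hQget : ∀ k, k < N → Qlist.getD k 0 = s.getD (qIdx N k) 0 := fun k hk =>
    queue_closed (fun j => s.getD j 0) N hN2 k hk
  -- the scanning loop
  have hr : PySem.List.pyRange 1 (N : Int) 1
      = (List.range (N - 1)).map (fun k => ((k + 1 : ℕ) : Int)) := by
    apply List.ext_getElem
    · rw [PySem.List.length_pyRange_one]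
      simp only [List.length_map, List.length_range]
      omega
    · intro i h1i h2i
      rw [PySem.List.getElem_pyRange_one]
      simp only [List.getElem_map, List.getElem_range]
      push_cast
      ring
  rw [hr]
  simp only [List.foldl_map]
  have hfold : (List.range (N - 1)).foldl
      (fun m k => max m |PySem.List.pyGetD Qlist ((k + 1 : ℕ) : Int) 0 -
        PySem.List.pyGetD Qlist (((k + 1 : ℕ) : Int) - 1) 0|) 0
      = (List.range (N - 1)).foldl
      (fun m k => max m |s.getD (qIdx N (k + 1)) 0 - s.getD (qIdx N k) 0|) 0 := by
    apply PySem.List.foldl_congr_mem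
    intro m k hk
    simp only [List.mem_range] at hk
    rw [PySem.List.pyGetD_natCast,
        show (((k + 1 : ℕ) : Int)) - 1 = ((k : ℕ) : Int) by push_cast; ring,
        PySem.List.pyGetD_natCast]
    rw [hQget (k + 1) (by omega), hQget k (by omega)]
  rw [hfold]
  -- the wrap-around pair
  rw [show PySem.List.pyGetD Qlist (-1) 0 = s.getD (qIdx N (N - 1)) 0 by
        rw [PySem.List.pyGetD_neg_ofNat Qlist 1 0 (by omega) (by simp [hQlen]; omega)]
        rw [← hQget (N - 1) (by omega), List.getD_eq_getElem _ _ (by omega)]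
        congr 1
        simp [hQlen],
      show PySem.List.pyGetD Qlist 0 0 = s.getD (qIdx N 0) 0 by
        rw [show (0 : Int) = ((0 : ℕ) : Int) by norm_num, PySem.List.pyGetD_natCast]
        exact hQget 0 (by omega)]

-- evaluating port B for length ≥ 3
lemma B_eval (arr : List Int) (h3 : 3 ≤ arr.length) :
    minOverallAwkwardness_alt arr =
      (List.range (arr.length - 2)).foldl
        (fun m i => max m ((PySem.List.sorted arr (fun x => x) false).getD (i + 2) 0 -
          (PySem.List.sorted arr (fun x => x) false).getD i 0)) 0 := by
  simp only [minOverallAwkwardness_alt]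
  rw [if_neg (by omega), if_neg (by omega)]
  set s := PySem.List.sorted arr (fun x => x) false with hsdef
  set N := arr.length with hNdef
  have hr : PySem.List.pyRange 0 ((N : Int) - 2) 1
      = (List.range (N - 2)).map (fun k => ((k : ℕ) : Int)) := by
    apply List.ext_getElem
    · rw [PySem.List.length_pyRange_one]
      simp only [List.length_map, List.length_range]
      omega
    · intro i h1i h2i
      rw [PySem.List.getElem_pyRange_one]
      simp only [List.getElem_map, List.getElem_range]
      omega
  rw [hr]
  simp only [List.foldl_map]
  apply PySem.List.foldl_congr_mem
  intro m k hk
  simp only [List.mem_range] at hk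
  rw [show ((k : ℕ) : Int) + 2 = ((k + 2 : ℕ) : Int) by push_cast; ring,
      PySem.List.pyGetD_natCast, PySem.List.pyGetD_natCast]

-- monotonicity of the sorted array under getD
lemma sorted_getD_mono (arr : List Int) (i j : ℕ) (hij : i ≤ j)
    (hj : j < arr.length) :
    (PySem.List.sorted arr (fun x => x) false).getD i 0
      ≤ (PySem.List.sorted arr (fun x => x) false).getD j 0 := by
  have hlen : (PySem.List.sorted arr (fun x => x) false).length = arr.length :=
    PySem.List.length_sorted arr _ false
  rw [List.getD_eq_getElem _ _ (by omega), List.getD_eq_getElem _ _ (by omega)]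
  exact PySem.List.sorted_id_getElem_mono arr hij (by omega)

-- ===== VERDICT (by name: the statement is the Claim_ definition above) =====
theorem minOverallAwkwardness_spec : Claim_equal_minOverallAwkwardness := by
  intro arr _
  unfold Spec_minOverallAwkwardness
  by_cases h1 : arr.length ≤ 1
  · simp only [minOverallAwkwardness, minOverallAwkwardness_alt]
    rw [if_pos (show ((arr.length : Int)) ≤ 1 by omega),
        if_pos (show ((arr.length : Int)) ≤ 1 by omega)]
  · by_cases h2 : arr.length = 2
    · -- two seats: both sides are s[1] - s[0]
      have hlen : (PySem.List.sorted arr (fun x => x) false).length = arr.length :=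
        PySem.List.length_sorted arr _ false
      have hm := sorted_getD_mono arr 0 1 (by omega) (by omega)
      rw [A_eval arr (by omega)]
      simp only [h2]
      norm_num [qIdx]
      simp only [minOverallAwkwardness_alt]
      rw [if_neg (by omega), if_pos (by omega)]
      have e1 : PySem.List.pyGetD (PySem.List.sorted arr (fun x => x) false) 1 0
          = (PySem.List.sorted arr (fun x => x) false).getD 1 0 := by
        rw [show (1 : Int) = ((1 : ℕ) : Int) from rfl, PySem.List.pyGetD_natCast]
      have e0 : PySem.List.pyGetD (PySem.List.sorted arr (fun x => x) false) 0 0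
          = (PySem.List.sorted arr (fun x => x) false).getD 0 0 := by
        rw [show (0 : Int) = ((0 : ℕ) : Int) from rfl, PySem.List.pyGetD_natCast]
      rw [e1, e0]
      have hm2 : (PySem.List.sorted arr (fun x => x) false)[0]?.getD 0
          ≤ (PySem.List.sorted arr (fun x => x) false)[1]?.getD 0 := by
        simpa [List.getD_eq_getElem?_getD] using hm
      rw [abs_sub_comm, abs_of_nonneg (by omega)]
      simp [List.getD_eq_getElem?_getD]
    · have h3 : 3 ≤ arr.length := by omega
      rw [A_eval arr (by omega), B_eval arr h3]
      exact zig_max_eq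
        (fun k => (PySem.List.sorted arr (fun x => x) false).getD k 0)
        arr.length h3
        (fun i j hij hj => sorted_getD_mono arr i j hij hj)
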